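-- pv_equiv track=rewrite | github.com/microsoft/KC | papers/ReTraCk/parser/sexpression_state.py | _infer_join_rel
-- ===== SOURCE A (Python) =====
-- from typing import Callable, Dict, List, Tuple, Set
--
-- ANY_STRING = "ANY"
--
-- MAXIMUM_PARAMETER_LEN = 1000
--
-- def _infer_join_rel(entity_tuples1: Set[Tuple], entity_tuples2: Set[Tuple]) -> Set[Tuple]:
--     # entity_tuples1: b1
--     # entity_tuples2: b2
--     # Inner join based on the first element of items in b2 and the second element of items in b1
--     entity_tuples1_entities = {example[1] for example in entity_tuples1}
--     entity_tuples2_entities = {example[0] for example in entity_tuples2}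
--     join_entities = entity_tuples1_entities & entity_tuples2_entities
--     # A -> ANY, ANY -> B ---> A x B
--     if ANY_STRING in entity_tuples1_entities or ANY_STRING in entity_tuples2_entities:
--         join_entities.add(ANY_STRING)
--
--     infer_entity_tuples = set()
--     for out_example in entity_tuples1:
--         # if ANY in entity 2, we should not skip
--         if out_example[1] not in join_entities and ANY_STRING not in entity_tuples2_entities:
--             continue
--         for in_example in entity_tuples2:
--             # if ANY, we should add all
--             if in_example[0] not in join_entities and out_example[1] != ANY_STRING:
--                 continue
--             infer_entity_tuples.add((out_example[0], in_example[1]))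
--     if (ANY_STRING, ANY_STRING) in infer_entity_tuples or len(infer_entity_tuples) > MAXIMUM_PARAMETER_LEN:
--         infer_entity_tuples = {(ANY_STRING, ANY_STRING)}
--     return infer_entity_tuples
-- ===== SOURCE B (Python) =====
-- ANY_STRING = "ANY"
--
-- MAXIMUM_PARAMETER_LEN = 1000
--
-- def _infer_join_rel(entity_tuples1, entity_tuples2):
--     # Hash-join: precompute the deduplicated lists of right-hand values once,
--     # then each left tuple just unions a precomputed bucket.
--     e1 = {t[1] for t in entity_tuples1}
--     e2 = {t[0] for t in entity_tuples2}
--     any2 = ANY_STRING in e2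
--     all_bs = list(dict.fromkeys(t[1] for t in entity_tuples2))
--     matched_bs = list(dict.fromkeys(
--         t[1] for t in entity_tuples2 if t[0] in e1 or t[0] == ANY_STRING))
--     out = set()
--     for a, y in entity_tuples1:
--         if y == ANY_STRING:
--             out.update((a, b) for b in all_bs)
--         elif y in e2 or any2:
--             out.update((a, b) for b in matched_bs)
--     if (ANY_STRING, ANY_STRING) in out or len(out) > MAXIMUM_PARAMETER_LEN:
--         return {(ANY_STRING, ANY_STRING)}
--     return out
-- ===== Notes on version B (the rewrite author's own statement) =====
-- stated objective: alternative
-- what changed: Replaces A's nested loop (which tests every (b1-row, b2-row) pair against the join set) by a hash-join: B precomputes the deduplicated lists of right-hand values of b2 (all values, and those whose key matches) once, and each b1 row just unions one precomputed bucket into the result set.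
import Mathlib
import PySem

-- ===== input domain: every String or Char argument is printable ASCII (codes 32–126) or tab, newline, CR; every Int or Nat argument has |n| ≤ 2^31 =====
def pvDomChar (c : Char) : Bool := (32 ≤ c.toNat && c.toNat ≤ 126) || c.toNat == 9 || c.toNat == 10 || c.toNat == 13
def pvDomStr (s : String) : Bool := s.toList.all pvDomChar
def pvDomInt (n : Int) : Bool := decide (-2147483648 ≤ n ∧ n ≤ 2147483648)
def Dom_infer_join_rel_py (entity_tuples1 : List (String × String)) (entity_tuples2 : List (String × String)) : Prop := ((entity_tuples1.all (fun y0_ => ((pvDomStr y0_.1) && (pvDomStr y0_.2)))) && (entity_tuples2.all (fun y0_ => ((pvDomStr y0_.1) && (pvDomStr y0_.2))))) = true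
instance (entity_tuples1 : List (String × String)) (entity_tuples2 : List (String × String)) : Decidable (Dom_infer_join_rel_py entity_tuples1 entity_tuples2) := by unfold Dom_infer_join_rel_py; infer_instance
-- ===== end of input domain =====

-- B replaces A's nested quadratic join loop by a hash-join: the deduplicated
-- right-hand value lists are precomputed once and each left tuple unions a
-- precomputed bucket (objective: alternative/faster where b2 has repeated values).

-- ===== PORT A =====
def infer_join_rel_py (entity_tuples1 : List (String × String)) (entity_tuples2 : List (String × String)) : List (String × String) :=
  let entity_tuples1_entities : PySem.Set String := PySem.Set.ofList (entity_tuples1.map (fun e => e.2))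
  let entity_tuples2_entities : PySem.Set String := PySem.Set.ofList (entity_tuples2.map (fun e => e.1))
  let join_entities : PySem.Set String :=
    if PySem.Set.contains entity_tuples1_entities "ANY" || PySem.Set.contains entity_tuples2_entities "ANY"
    then PySem.Set.add (PySem.Set.inter entity_tuples1_entities entity_tuples2_entities) "ANY"
    else PySem.Set.inter entity_tuples1_entities entity_tuples2_entities
  let infer_entity_tuples : PySem.Set (String × String) :=
    entity_tuples1.foldl (fun acc out_example =>
      if !(PySem.Set.contains join_entities out_example.2) && !(PySem.Set.contains entity_tuples2_entities "ANY")
      then acc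
      else entity_tuples2.foldl (fun acc2 in_example =>
        if !(PySem.Set.contains join_entities in_example.1) && !(out_example.2 == "ANY")
        then acc2
        else PySem.Set.add acc2 (out_example.1, in_example.2)) acc)
      PySem.Set.empty
  if PySem.Set.contains infer_entity_tuples ("ANY", "ANY") || infer_entity_tuples.length > 1000
  then [("ANY", "ANY")] else infer_entity_tuples

-- ===== PORT B =====
def infer_join_rel_py_alt (entity_tuples1 : List (String × String)) (entity_tuples2 : List (String × String)) : List (String × String) :=
  let e1 : PySem.Set String := PySem.Set.ofList (entity_tuples1.map (fun t => t.2))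
  let e2 : PySem.Set String := PySem.Set.ofList (entity_tuples2.map (fun t => t.1))
  let any2 : Bool := PySem.Set.contains e2 "ANY"
  let all_bs : List String := PySem.List.dedup (entity_tuples2.map (fun t => t.2))
  let matched_bs : List String := PySem.List.dedup
    ((entity_tuples2.filter (fun t => PySem.Set.contains e1 t.1 || t.1 == "ANY")).map (fun t => t.2))
  let out : PySem.Set (String × String) :=
    entity_tuples1.foldl (fun acc t =>
      if t.2 == "ANY" then PySem.Set.update acc (all_bs.map (fun b => (t.1, b)))
      else if PySem.Set.contains e2 t.2 || any2 then PySem.Set.update acc (matched_bs.map (fun b => (t.1, b)))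
      else acc) PySem.Set.empty
  if PySem.Set.contains out ("ANY", "ANY") || out.length > 1000
  then [("ANY", "ANY")] else out

-- ===== PRECONDITION & SPEC =====
def Spec_infer_join_rel_py (entity_tuples1 : List (String × String)) (entity_tuples2 : List (String × String)) (out : List (String × String)) : Prop := out = infer_join_rel_py_alt entity_tuples1 entity_tuples2
instance (entity_tuples1 : List (String × String)) (entity_tuples2 : List (String × String)) (out : List (String × String)) : Decidable (Spec_infer_join_rel_py entity_tuples1 entity_tuples2 out) := by unfold Spec_infer_join_rel_py; infer_instance

-- ===== CLAIM (what is proved, stated in full; the proofs are below) =====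
def Claim_equal_infer_join_rel_py : Prop := ∀ (entity_tuples1 : List (String × String)) (entity_tuples2 : List (String × String)), Dom_infer_join_rel_py entity_tuples1 entity_tuples2 → Spec_infer_join_rel_py entity_tuples1 entity_tuples2 (infer_join_rel_py entity_tuples1 entity_tuples2)

-- ===== LEMMAS AND PROOFS =====

-- proof-side abbreviations for the sets both ports build
def pvE1 (b1 : List (String × String)) : PySem.Set String :=
  PySem.Set.ofList (b1.map (fun e => e.2))

def pvE2 (b2 : List (String × String)) : PySem.Set String :=
  PySem.Set.ofList (b2.map (fun e => e.1))

def pvJ (b1 b2 : List (String × String)) : PySem.Set String :=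
  if (pvE1 b1).contains "ANY" || (pvE2 b2).contains "ANY"
  then ((pvE1 b1).inter (pvE2 b2)).add "ANY"
  else (pvE1 b1).inter (pvE2 b2)

-- add commutes with an injective map
theorem pv_map_add {β γ : Type} [BEq β] [LawfulBEq β] [BEq γ] [LawfulBEq γ]
    (f : β → γ) (hf : Function.Injective f) (s : PySem.Set β) (x : β) :
    (PySem.Set.add s x).map f = PySem.Set.add (s.map f) (f x) := by
  by_cases hx : x ∈ s
  · rw [PySem.Set.add_of_mem hx, PySem.Set.add_of_mem (List.mem_map.mpr ⟨x, hx, rfl⟩)]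
  · have hfx : f x ∉ s.map f := by
      intro h
      obtain ⟨b, hb, hbe⟩ := List.mem_map.mp h
      exact hx (hf hbe ▸ hb)
    rw [PySem.Set.add_of_not_mem hx, PySem.Set.add_of_not_mem hfx, List.map_append]
    rfl

-- set(map f xs) = map f (set(xs)) for injective f
theorem pv_ofList_map {β γ : Type} [BEq β] [LawfulBEq β] [BEq γ] [LawfulBEq γ]
    (f : β → γ) (hf : Function.Injective f) (xs : List β) :
    PySem.Set.ofList (xs.map f) = (PySem.Set.ofList xs).map f := by
  induction xs using List.reverseRecOn with
  | nil => rfl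
  | append_singleton xs x ih =>
    rw [List.map_append, List.map_singleton, PySem.Set.ofList_append_singleton,
      PySem.Set.ofList_append_singleton, ih, pv_map_add f hf]

-- updating with map f (dedup bs) is updating with map f bs, f injective
theorem pv_update_dedup {β γ : Type} [BEq β] [LawfulBEq β] [BEq γ] [LawfulBEq γ]
    (f : β → γ) (hf : Function.Injective f) (acc : PySem.Set γ) (bs : List β) :
    PySem.Set.update acc ((PySem.List.dedup bs).map f) = PySem.Set.update acc (bs.map f) := by
  rw [PySem.Set.update_eq_append_filter, PySem.Set.update_eq_append_filter,
    PySem.List.dedup_eq_ofList, ← pv_ofList_map f hf, PySem.Set.ofList_ofList,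
    pv_ofList_map f hf]

-- a loop that skips on c and otherwise adds f x is an update with the filtered map
theorem pv_foldl_skip_add {α β : Type} [BEq β] [LawfulBEq β]
    (l : List α) (c : α → Bool) (f : α → β) (acc : PySem.Set β) :
    l.foldl (fun a2 x => if c x then a2 else PySem.Set.add a2 (f x)) acc
      = PySem.Set.update acc ((l.filter (fun x => !(c x))).map f) := by
  induction l generalizing acc with
  | nil => rfl
  | cons x xs ih =>
    by_cases hc : c x = true
    · simp [hc, ih]
    · simp only [Bool.not_eq_true] at hc
      simp [hc, ih, PySem.Set.update_cons]

theorem pv_pair_inj (a : String) : Function.Injective (fun b => ((a, b) : String × String)) := by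
  intro b b' h
  exact ((Prod.mk.injEq _ _ _ _).mp h).2

-- membership in A's join_entities set, characterised over the inputs
theorem pv_mem_J (b1 b2 : List (String × String)) (x : String) :
    x ∈ pvJ b1 b2 ↔
      (x ∈ pvE1 b1 ∧ x ∈ pvE2 b2) ∨ (("ANY" ∈ pvE1 b1 ∨ "ANY" ∈ pvE2 b2) ∧ x = "ANY") := by
  unfold pvJ
  by_cases hf : ("ANY" ∈ pvE1 b1 ∨ "ANY" ∈ pvE2 b2)
  · have hb : ((pvE1 b1).contains "ANY" || (pvE2 b2).contains "ANY") = true := by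
      simpa [PySem.Set.contains_iff] using hf
    rw [if_pos hb]
    simp [PySem.Set.mem_add, PySem.Set.mem_inter, hf]
  · have hf' := not_or.mp hf
    have hb : ¬ (((pvE1 b1).contains "ANY" || (pvE2 b2).contains "ANY") = true) := by
      simp [hf'.1, hf'.2]
    rw [if_neg hb]
    simp [PySem.Set.mem_inter, hf'.1, hf'.2]

-- the two step functions agree on every element of b1
theorem pv_step_eq (b1 b2 : List (String × String)) (t : String × String) (ht : t ∈ b1)
    (acc : PySem.Set (String × String)) :
    (if !(pvJ b1 b2).contains t.2 && !(pvE2 b2).contains "ANY" then acc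
     else b2.foldl (fun acc2 ie =>
        if !(pvJ b1 b2).contains ie.1 && !(t.2 == "ANY") then acc2
        else acc2.add (t.1, ie.2)) acc)
    = (if t.2 == "ANY" then
         PySem.Set.update acc ((PySem.List.dedup (b2.map (fun e => e.2))).map (fun b => (t.1, b)))
       else if (pvE2 b2).contains t.2 || (pvE2 b2).contains "ANY" then
         PySem.Set.update acc
           ((PySem.List.dedup ((b2.filter (fun e => (pvE1 b1).contains e.1 || e.1 == "ANY")).map
              (fun e => e.2))).map (fun b => (t.1, b)))
       else acc) := by
  have hty : t.2 ∈ pvE1 b1 :=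
    (PySem.Set.mem_ofList _ _).mpr (List.mem_map.mpr ⟨t, ht, rfl⟩)
  by_cases hA : t.2 = "ANY"
  · -- the wildcard row: every element of b2 is joined
    have hJany : ((pvJ b1 b2).contains "ANY") = true :=
      (PySem.Set.contains_iff _ _).mpr ((pv_mem_J b1 b2 "ANY").mpr (Or.inr ⟨Or.inl (hA ▸ hty), rfl⟩))
    rw [if_pos (show (t.2 == "ANY") = true by simp [hA]),
      pv_update_dedup _ (pv_pair_inj t.1), List.map_map,
      show (List.map ((fun b => (t.1, b)) ∘ fun e => e.2) b2)
         = List.map (fun ie => (t.1, ie.2)) b2 from rfl,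
      PySem.Set.update_map_eq_foldl_add]
    rw [if_neg (show ¬ ((!(pvJ b1 b2).contains t.2 && !(pvE2 b2).contains "ANY") = true) by
      rw [hA, hJany]
      simp only [Bool.not_true, Bool.false_and]
      exact Bool.false_ne_true)]
    exact PySem.List.foldl_congr_mem' _ _ _ _ (fun ie hie acc2 => by simp [hA])
  · have ht2 : (t.2 == "ANY") = false := by simp [hA]
    have hF2 : (pvJ b1 b2).contains t.2 = (pvE2 b2).contains t.2 := by
      cases h : (pvE2 b2).contains t.2 with
      | false =>
        rw [Bool.eq_false_iff]
        intro hc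
        rcases (pv_mem_J b1 b2 t.2).mp ((PySem.Set.contains_iff _ _).mp hc) with
          ⟨_, h2⟩ | ⟨_, h2⟩
        · exact absurd ((PySem.Set.contains_iff _ _).mpr h2) (Bool.eq_false_iff.mp h)
        · exact hA h2
      | true =>
        exact (PySem.Set.contains_iff _ _).mpr
          ((pv_mem_J b1 b2 t.2).mpr (Or.inl ⟨hty, (PySem.Set.contains_iff _ _).mp h⟩))
    by_cases hcond : ((pvE2 b2).contains t.2 || (pvE2 b2).contains "ANY") = true
    · -- row joins: the inner loop is exactly the precomputed matched bucket
      have hlhs : (!(pvJ b1 b2).contains t.2 && !(pvE2 b2).contains "ANY") = false := by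
        rw [hF2]
        rcases Bool.or_eq_true_iff.mp hcond with h | h
        · rw [h]
          simp only [Bool.not_true, Bool.false_and]
        · rw [h]
          simp only [Bool.not_true, Bool.and_false]
      rw [if_neg (Bool.eq_false_iff.mp hlhs), if_neg (Bool.eq_false_iff.mp ht2), if_pos hcond]
      have hstep : (fun (acc2 : PySem.Set (String × String)) (ie : String × String) =>
            if !(pvJ b1 b2).contains ie.1 && !(t.2 == "ANY") then acc2
            else acc2.add (t.1, ie.2))
          = (fun acc2 ie =>
            if !(pvJ b1 b2).contains ie.1 then acc2 else acc2.add (t.1, ie.2)) := by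
        funext acc2 ie
        simp [ht2]
      rw [hstep,
        pv_foldl_skip_add b2 (fun ie => !(pvJ b1 b2).contains ie.1) (fun ie => (t.1, ie.2)) acc,
        pv_update_dedup _ (pv_pair_inj t.1), List.map_map]
      have hfil : b2.filter (fun ie => !!(pvJ b1 b2).contains ie.1)
          = b2.filter (fun e => (pvE1 b1).contains e.1 || e.1 == "ANY") := by
        apply List.filter_congr
        intro ie hie
        have hie1 : ie.1 ∈ pvE2 b2 :=
          (PySem.Set.mem_ofList _ _).mpr (List.mem_map.mpr ⟨ie, hie, rfl⟩)
        simp only [Bool.not_not]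
        cases hany : (ie.1 == "ANY") with
        | false =>
          have hne : ie.1 ≠ "ANY" := by simpa using hany
          cases he1 : (pvE1 b1).contains ie.1 with
          | false =>
            simp only [Bool.or_false]
            rw [Bool.eq_false_iff]
            intro hc
            rcases (pv_mem_J b1 b2 ie.1).mp ((PySem.Set.contains_iff _ _).mp hc) with
              ⟨h1, _⟩ | ⟨_, h2⟩
            · exact absurd ((PySem.Set.contains_iff _ _).mpr h1) (Bool.eq_false_iff.mp he1)
            · exact hne h2
          | true =>
            have h1 : ie.1 ∈ pvE1 b1 := (PySem.Set.contains_iff _ _).mp he1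
            have hm1 : ie.1 ∈ pvJ b1 b2 := (pv_mem_J b1 b2 ie.1).mpr (Or.inl ⟨h1, hie1⟩)
            simp [hm1]
        | true =>
          have heq : ie.1 = "ANY" := by simpa using hany
          have hm : ie.1 ∈ pvJ b1 b2 :=
            (pv_mem_J b1 b2 ie.1).mpr (Or.inr ⟨Or.inr (heq ▸ hie1), heq⟩)
          simp [hm]
      rw [hfil]
      rfl
    · -- row is skipped by both implementations
      have hlhs : (!(pvJ b1 b2).contains t.2 && !(pvE2 b2).contains "ANY") = true := by
        simp only [Bool.or_eq_true, not_or, Bool.not_eq_true] at hcond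
        rw [hF2, hcond.1, hcond.2]
        rfl
      rw [if_pos hlhs, if_neg (Bool.eq_false_iff.mp ht2), if_neg hcond]

-- ===== VERDICT (by name: the statement is the Claim_ definition above) =====
theorem infer_join_rel_py_spec : Claim_equal_infer_join_rel_py := by
  intro b1 b2 _
  unfold Spec_infer_join_rel_py infer_join_rel_py infer_join_rel_py_alt
  simp only []
  have hfold :
      b1.foldl (fun acc t =>
        if !(pvJ b1 b2).contains t.2 && !(pvE2 b2).contains "ANY" then acc
        else b2.foldl (fun acc2 ie =>
          if !(pvJ b1 b2).contains ie.1 && !(t.2 == "ANY") then acc2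
          else acc2.add (t.1, ie.2)) acc) PySem.Set.empty
      = b1.foldl (fun acc t =>
        if t.2 == "ANY" then
          PySem.Set.update acc ((PySem.List.dedup (b2.map (fun e => e.2))).map (fun b => (t.1, b)))
        else if (pvE2 b2).contains t.2 || (pvE2 b2).contains "ANY" then
          PySem.Set.update acc
            ((PySem.List.dedup ((b2.filter (fun e => (pvE1 b1).contains e.1 || e.1 == "ANY")).map
               (fun e => e.2))).map (fun b => (t.1, b)))
        else acc) PySem.Set.empty := by
    apply PySem.List.foldl_congr_mem'
    intro t ht acc
    exact pv_step_eq b1 b2 t ht acc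
  exact congrArg (fun S : PySem.Set (String × String) =>
    if S.contains ("ANY", "ANY") || S.length > 1000 then [("ANY", "ANY")] else S) hfold
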